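-- pv_equiv track=rewrite | github.com/Aasthaengg/IBMdataset | Python_codes/p03425/s116667733.py | solve
-- ===== SOURCE A (Python) =====
-- from itertools import combinations
--
-- def solve(N, S):
--     Z = [0 for i in range(26)]
--     for s in S:
--         a = s[0]
--         Z[ord(a)-ord("A")] += 1
--     ans = 0
--     D = [Z[ord(a)-ord("A")] for a in "MARCH"]
--     for i, j, k in combinations(D, r=3):
--         ans += i * j * k
--     return ans
-- ===== SOURCE B (Python) =====
-- def solve(N, S):
--     # count words starting with each MARCH letter, then e3 via a running DP
--     counts = [sum(1 for s in S if s[:1] == ch) for ch in "MARCH"]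
--     dp = [1, 0, 0, 0]
--     for c in counts:
--         dp[3] += dp[2] * c
--         dp[2] += dp[1] * c
--         dp[1] += dp[0] * c
--     return dp[3]
-- ===== Notes on version B (the rewrite author's own statement) =====
-- stated objective: alternative
-- what changed: B counts only genuine M/A/R/C/H first letters directly (no 26-cell array, no negative-index wraparound) and computes the sum of triple products as the elementary symmetric polynomial e3 by a running DP over the five counts instead of enumerating itertools.combinations of size 3.
-- intended difference: On inputs where some word's first character is one of ' ) . 3 8 (codes 39-64 alias an uppercase letter via Python negative-index wraparound, these five alias a MARCH letter) and at least 3 of the 5 MARCH groups are inhabited, A silently counts such words as M/A/R/C/H words and returns a strictly larger product sum, while B counts only real M/A/R/C/H initials, which is the intended behaviour of the MARCH problem. — e.g. on solve(3, ["3x", "Ab", "Rc"]): A returns 1, B returns 0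
import Mathlib
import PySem

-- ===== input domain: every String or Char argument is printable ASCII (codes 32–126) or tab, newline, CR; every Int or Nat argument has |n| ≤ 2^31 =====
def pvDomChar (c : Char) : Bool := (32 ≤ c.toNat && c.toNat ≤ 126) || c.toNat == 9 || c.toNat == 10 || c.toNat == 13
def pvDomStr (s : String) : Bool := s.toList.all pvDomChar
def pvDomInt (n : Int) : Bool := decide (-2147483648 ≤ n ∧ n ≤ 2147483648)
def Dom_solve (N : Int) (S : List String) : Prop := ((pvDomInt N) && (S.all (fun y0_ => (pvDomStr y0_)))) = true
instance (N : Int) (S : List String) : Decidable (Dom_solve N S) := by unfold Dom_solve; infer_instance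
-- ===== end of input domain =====

-- B counts genuine M/A/R/C/H initials only and computes the triple-product sum as e3 by a running DP
-- instead of building a 26-cell array (with Python negative-index wraparound) and enumerating combinations.


-- ===== PORT A =====
-- itertools.combinations(D, r=3), in Python's emission order
def pvCombos2 : List Int → List (Int × Int)
  | [] => []
  | x :: xs => xs.map (fun y => (x, y)) ++ pvCombos2 xs

def pvCombos3 : List Int → List (Int × Int × Int)
  | [] => []
  | x :: xs => (pvCombos2 xs).map (fun p => (x, p.1, p.2)) ++ pvCombos3 xs

-- the counting loop: a = s[0]; Z[ord(a)-65] += 1  (Option threads the possible IndexError)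
def pvLoopA (S : List String) (Z0 : List Int) : Option (List Int) :=
  S.foldl
    (fun acc s => acc.bind (fun Z =>
      (PySem.Str.pyGet? s 0).bind (fun a =>
        (PySem.List.pyGet? Z ((a.toNat : Int) - 65)).bind (fun v =>
          PySem.List.pySet? Z ((a.toNat : Int) - 65) (v + 1)))))
    (some Z0)

def solve (N : Int) (S : List String) : Int :=
  match pvLoopA S ((PySem.List.pyRange 0 26 1).map (fun _ => (0 : Int))) with
  | none => 0   -- Python raised here; excluded by Pre_solve
  | some Z =>
    -- D = [Z[ord(a)-ord("A")] for a in "MARCH"]; these indices are always in range (pyGetD is exact here)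
    let D := ['M', 'A', 'R', 'C', 'H'].map (fun a => PySem.List.pyGetD Z ((a.toNat : Int) - 65) 0)
    (pvCombos3 D).foldl (fun ans t => ans + t.1 * t.2.1 * t.2.2) 0

-- ===== PORT B =====
-- sum(1 for s in S if s[:1] == ch); s[:1] is s.toList.take 1 (exact, also on the empty string)
def pvCountFirst (S : List String) (ch : Char) : Int :=
  (S.map (fun s => if s.toList.take 1 = [ch] then (1 : Int) else 0)).sum

-- one DP step: dp[3] += dp[2]*c; dp[2] += dp[1]*c; dp[1] += dp[0]*c
def pvDpStep (dp : Int × Int × Int × Int) (c : Int) : Int × Int × Int × Int :=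
  (dp.1, dp.2.1 + dp.1 * c, dp.2.2.1 + dp.2.1 * c, dp.2.2.2 + dp.2.2.1 * c)

def solve_alt (N : Int) (S : List String) : Int :=
  ((['M', 'A', 'R', 'C', 'H'].map (pvCountFirst S)).foldl pvDpStep (1, 0, 0, 0)).2.2.2

-- ===== PRECONDITION & SPEC =====
-- a word's first character (' ', excluded everywhere below, for the empty word)
def pvHd (s : String) : Char := s.toList.headD ' '

-- A raises IndexError on an empty word or a first character outside codes 39..90
def Pre_solve (N : Int) (S : List String) : Prop :=
  ∀ s ∈ S, 39 ≤ (pvHd s).toNat ∧ (pvHd s).toNat ≤ 90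
instance (N : Int) (S : List String) : Decidable (Pre_solve N S) := by unfold Pre_solve; infer_instance

def pvWitness_solve : Int × List String := (3, ["Mop", "Arc", "Rch"])

-- On inputs where some word's first character is one of ' ) . 3 8 (codes 39 41 46 51 56, which alias
-- M A R C H through Python negative-index wraparound) and at least 3 of the 5 MARCH groups are inhabited,
-- A counts those words as MARCH words and returns a strictly larger sum; B counts only genuine
-- M/A/R/C/H initials, the intended behaviour of the MARCH problem.
def D_solve (N : Int) (S : List String) : Prop :=
  S.any (fun s => "').38".toList.contains (pvHd s)) ∧
    3 ≤ "MARCH".toList.countP (fun c => S.any (fun s => (pvHd s).toNat % 26 == c.toNat % 26))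
instance (N : Int) (S : List String) : Decidable (D_solve N S) := by unfold D_solve; infer_instance

def Spec_solve (N : Int) (S : List String) (out : Int) : Prop := ¬ D_solve N S → out = solve_alt N S
instance (N : Int) (S : List String) (out : Int) : Decidable (Spec_solve N S out) := by unfold Spec_solve; infer_instance

def pvDiffWitness_solve : Int × List String := (3, ["3x", "Ab", "Rc"])
def pvDiffWitnessOut_solve : Int × Int := (1, 0)

-- ===== CLAIM (what is proved, stated in full; the proofs are below) =====
def Claim_unchanged_solve : Prop := ∀ (N : Int) (S : List String), Dom_solve N S → Pre_solve N S → Spec_solve N S (solve N S)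
def Claim_exact_solve : Prop := ∀ (N : Int) (S : List String), Dom_solve N S → Pre_solve N S → D_solve N S → solve N S ≠ solve_alt N S
def Claim_changed_solve : Prop := Dom_solve (pvDiffWitness_solve.1) (pvDiffWitness_solve.2) ∧ Pre_solve (pvDiffWitness_solve.1) (pvDiffWitness_solve.2) ∧ D_solve (pvDiffWitness_solve.1) (pvDiffWitness_solve.2) ∧ solve (pvDiffWitness_solve.1) (pvDiffWitness_solve.2) = pvDiffWitnessOut_solve.1 ∧ solve_alt (pvDiffWitness_solve.1) (pvDiffWitness_solve.2) = pvDiffWitnessOut_solve.2 ∧ pvDiffWitnessOut_solve.1 ≠ pvDiffWitnessOut_solve.2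

-- ===== LEMMAS AND PROOFS =====
-- code of a word's first character (-1 for the empty word), as A's arithmetic sees it
def pvHeadCode (s : String) : Int :=
  match s.toList with
  | [] => -1
  | c :: _ => (c.toNat : Int)

theorem pvHd_code (s : String) (h : 39 ≤ (pvHd s).toNat) :
    pvHeadCode s = ((pvHd s).toNat : Int) := by
  rcases hs : s.toList with _ | ⟨c, cs⟩
  · simp [pvHd, hs] at h
  · simp [pvHeadCode, pvHd, hs]

-- does some word of S start with letter of code L or with its wraparound alias of code L-26?
def pvInGroup (L : Int) (s : String) : Bool := pvHeadCode s == L || pvHeadCode s == L - 26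

-- Python's wrapped index ord(head)-65 into the 26-cell array, as a position, for head codes 39..90
def pvPos (h : Int) : Nat := if 65 ≤ h then (h - 65).toNat else (h - 39).toNat

-- proof-side shape of A's counting loop
def pvRun (S : List String) (Z : List Int) : List Int :=
  S.foldl (fun Z s => Z.set (pvPos (pvHeadCode s)) (Z.getD (pvPos (pvHeadCode s)) 0 + 1)) Z

-- A's count for the letter of code L (counts real initials and their wraparound aliases)
def pvACnt (S : List String) (L : Int) : Int := (S.countP (fun s => pvInGroup L s) : Int)

-- elementary symmetric polynomial e3 of the five MARCH counts
def pvE3 (m a r c h : Int) : Int :=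
  m*a*r + m*a*c + m*a*h + m*r*c + m*r*h + m*c*h + a*r*c + a*r*h + a*c*h + r*c*h

theorem pvIdx_eq (h : Int) (h1 : 39 ≤ h) (h2 : h ≤ 90) :
    PySem.List.pyIdx? 26 (h - 65) = some (pvPos h) := by
  by_cases hge : (65:Int) ≤ h
  · have h0 : (0:Int) ≤ h - 65 := by omega
    have h26 : h - 65 < (26:Int) := by omega
    simp [PySem.List.pyIdx?, pvPos, h0, h26, hge]
  · have h0 : ¬ ((0:Int) ≤ h - 65) := by omega
    have hm : -(26:Nat) ≤ h - 65 := by omega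
    simp only [PySem.List.pyIdx?, pvPos, h0, hm, hge, if_true, if_false,
      Option.some.injEq]
    omega

theorem pvPos_lt (h : Int) (h1 : 39 ≤ h) (h2 : h ≤ 90) : pvPos h < 26 := by
  unfold pvPos; split_ifs <;> omega

theorem pvStepA (Z : List Int) (hZ : Z.length = 26) (s : String)
    (h1 : 39 ≤ pvHeadCode s) (h2 : pvHeadCode s ≤ 90) :
    ((PySem.Str.pyGet? s 0).bind (fun a =>
      (PySem.List.pyGet? Z ((a.toNat : Int) - 65)).bind (fun v =>
        PySem.List.pySet? Z ((a.toNat : Int) - 65) (v + 1)))) =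
    some (Z.set (pvPos (pvHeadCode s)) (Z.getD (pvPos (pvHeadCode s)) 0 + 1)) := by
  rcases hs : s.toList with _ | ⟨c, cs⟩
  · simp [pvHeadCode, hs] at h1
  · have hc : pvHeadCode s = (c.toNat : Int) := by simp [pvHeadCode, hs]
    have hget : PySem.Str.pyGet? s 0 = some c := by
      simp [PySem.Str.pyGet?, PySem.Chars.pyGet?, PySem.List.pyGet?, PySem.List.pyIdx?, hs]
    rw [hget, Option.bind_some, ← hc]
    unfold PySem.List.pyGet? PySem.List.pySet?
    rw [hZ, pvIdx_eq _ h1 h2]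
    have hlt : pvPos (pvHeadCode s) < Z.length := hZ ▸ pvPos_lt _ h1 h2
    rw [Option.bind_some, List.getElem?_eq_getElem hlt, Option.bind_some, Option.map_some]
    rw [List.getD_eq_getElem _ _ hlt]

theorem pvLoopA_eq (S : List String) (Z : List Int) (hZ : Z.length = 26)
    (hP : ∀ s ∈ S, 39 ≤ pvHeadCode s ∧ pvHeadCode s ≤ 90) :
    pvLoopA S Z = some (pvRun S Z) := by
  induction S generalizing Z with
  | nil => rfl
  | cons s S ih =>
    have hs := hP s (by simp)
    unfold pvLoopA pvRun
    simp only [List.foldl_cons, Option.bind_some]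
    rw [pvStepA Z hZ s hs.1 hs.2]
    exact ih _ (by simp [hZ]) (fun t ht => hP t (by simp [ht]))

theorem pvRun_getD (S : List String) (Z : List Int) (hZ : Z.length = 26) (t : Nat) (ht : t < 26) :
    (pvRun S Z).getD t 0
      = Z.getD t 0 + (S.countP (fun s => pvPos (pvHeadCode s) == t) : Int) := by
  induction S generalizing Z with
  | nil => simp [pvRun]
  | cons s S ih =>
    unfold pvRun
    simp only [List.foldl_cons]
    rw [show (List.foldl (fun Z s => Z.set (pvPos (pvHeadCode s)) (Z.getD (pvPos (pvHeadCode s)) 0 + 1))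
          (Z.set (pvPos (pvHeadCode s)) (Z.getD (pvPos (pvHeadCode s)) 0 + 1)) S)
        = pvRun S (Z.set (pvPos (pvHeadCode s)) (Z.getD (pvPos (pvHeadCode s)) 0 + 1)) from rfl]
    rw [ih _ (by simp [hZ]), List.countP_cons]
    have hset : ∀ v : Int, (Z.set (pvPos (pvHeadCode s)) v).getD t 0
        = if pvPos (pvHeadCode s) = t then v else Z.getD t 0 := by
      intro v
      simp only [List.getD_eq_getElem?_getD, List.getElem?_set, hZ]
      split_ifs with hpt hlt <;> simp_all
    rw [hset]
    by_cases hpt : pvPos (pvHeadCode s) = t <;> simp [hpt] <;> push_cast <;> ring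

theorem pvZ0_eq : (PySem.List.pyRange 0 26 1).map (fun _ => (0:Int)) = List.replicate 26 0 := by
  simp [PySem.List.pyRange_one]; rfl

theorem pvCnt_eq (S : List String) (hP : ∀ s ∈ S, 39 ≤ pvHeadCode s ∧ pvHeadCode s ≤ 90)
    (t : Nat) (L : Int) (hL : L = 65 + t) (ht : t < 26) :
    (S.countP (fun s => pvPos (pvHeadCode s) == t) : Int) = pvACnt S L := by
  unfold pvACnt
  congr 1
  apply List.countP_congr
  intro s hs
  have h := hP s hs
  simp only [pvInGroup, beq_iff_eq, Bool.or_eq_true]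
  unfold pvPos
  split_ifs <;> omega

theorem pvSolveA_eq (N : Int) (S : List String)
    (hP : ∀ s ∈ S, 39 ≤ pvHeadCode s ∧ pvHeadCode s ≤ 90) :
    solve N S = pvE3 (pvACnt S 77) (pvACnt S 65) (pvACnt S 82) (pvACnt S 67) (pvACnt S 72) := by
  unfold solve
  rw [pvZ0_eq, pvLoopA_eq S _ (by simp) hP]
  simp only [List.map_cons, List.map_nil]
  rw [show (('M'.toNat : Int) - 65) = ((12:Nat):Int) from rfl,
      show (('A'.toNat : Int) - 65) = ((0:Nat):Int) from rfl,
      show (('R'.toNat : Int) - 65) = ((17:Nat):Int) from rfl,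
      show (('C'.toNat : Int) - 65) = ((2:Nat):Int) from rfl,
      show (('H'.toNat : Int) - 65) = ((7:Nat):Int) from rfl]
    
  simp only [PySem.List.pyGetD_natCast]
  rw [pvRun_getD S _ (by simp) 12 (by omega), pvRun_getD S _ (by simp) 0 (by omega),
      pvRun_getD S _ (by simp) 17 (by omega), pvRun_getD S _ (by simp) 2 (by omega),
      pvRun_getD S _ (by simp) 7 (by omega)]
  rw [List.getD_replicate _ (by omega), List.getD_replicate _ (by omega),
      List.getD_replicate _ (by omega), List.getD_replicate _ (by omega),
      List.getD_replicate _ (by omega)]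
  rw [pvCnt_eq S hP 12 77 (by omega) (by omega), pvCnt_eq S hP 0 65 (by omega) (by omega),
      pvCnt_eq S hP 17 82 (by omega) (by omega), pvCnt_eq S hP 2 67 (by omega) (by omega),
      pvCnt_eq S hP 7 72 (by omega) (by omega)]
  simp only [pvCombos3, pvCombos2, List.map_cons, List.map_nil, List.append_nil,
    List.cons_append, List.nil_append, List.foldl_cons, List.foldl_nil]
  unfold pvE3
  ring

theorem pvSolveB_eq (N : Int) (S : List String) :
    solve_alt N S
      = pvE3 (pvCountFirst S 'M') (pvCountFirst S 'A') (pvCountFirst S 'R')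
             (pvCountFirst S 'C') (pvCountFirst S 'H') := by
  unfold solve_alt pvE3
  simp only [List.map_cons, List.map_nil, List.foldl_cons, List.foldl_nil, pvDpStep]
  ring

theorem pvBCnt_countP (S : List String) (ch : Char) :
    pvCountFirst S ch = (S.countP (fun s => s.toList.take 1 == [ch]) : Int) := by
  unfold pvCountFirst
  rw [← PySem.List.sum_map_ite_one_zero]
  simp [beq_iff_eq]

theorem pvTake1_iff (s : String) (ch : Char) (hne : 39 ≤ pvHeadCode s) :
    s.toList.take 1 = [ch] ↔ pvHeadCode s = (ch.toNat : Int) := by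
  rcases hs : s.toList with _ | ⟨c, cs⟩
  · simp [pvHeadCode, hs] at hne
  · have hc : pvHeadCode s = (c.toNat : Int) := by simp [pvHeadCode, hs]
    simp only [hc, hs]
    simp only [List.take_succ_cons, List.take_zero, List.cons.injEq, and_true]
    have hiff : c = ch ↔ c.toNat = ch.toNat := eq_iff_eq_of_cmp_eq_cmp rfl
    constructor
    · rintro rfl; rfl
    · intro h
      exact hiff.mpr (by exact_mod_cast h)

theorem pvACnt_zero (S : List String) (L : Int) (h : S.any (pvInGroup L) = false) :
    pvACnt S L = 0 := by
  unfold pvACnt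
  rw [List.countP_eq_zero.mpr]
  · rfl
  · intro s hs
    have := List.any_eq_false.mp h s hs
    simpa using this

theorem pvBCnt_zero (S : List String) (L : Int) (ch : Char)
    (hch : (ch.toNat : Int) = L) (hP : ∀ s ∈ S, 39 ≤ pvHeadCode s ∧ pvHeadCode s ≤ 90)
    (h : S.any (pvInGroup L) = false) : pvCountFirst S ch = 0 := by
  rw [pvBCnt_countP, List.countP_eq_zero.mpr]
  · rfl
  · intro s hs
    have hg := List.any_eq_false.mp h s hs
    have hne := (hP s hs).1
    simp only [pvInGroup, Bool.or_eq_true, beq_iff_eq, not_or] at hg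
    simp only [beq_iff_eq]
    rw [pvTake1_iff s ch hne, hch]
    exact hg.1

theorem pvCnt_agree (S : List String) (L : Int) (ch : Char)
    (hch : (ch.toNat : Int) = L) (hP : ∀ s ∈ S, 39 ≤ pvHeadCode s ∧ pvHeadCode s ≤ 90)
    (hal : ∀ s ∈ S, pvHeadCode s ≠ L - 26) : pvACnt S L = pvCountFirst S ch := by
  rw [pvBCnt_countP]
  unfold pvACnt
  congr 1
  apply List.countP_congr
  intro s hs
  have hne := (hP s hs).1
  simp only [pvInGroup, Bool.or_eq_true, beq_iff_eq]
  rw [pvTake1_iff s ch hne, hch]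
  have := hal s hs
  tauto

theorem pvAny_eq (S : List String) (hP : ∀ s ∈ S, 39 ≤ (pvHd s).toNat ∧ (pvHd s).toNat ≤ 90)
    (c : Char) (L : Int) (hcL : (c.toNat : Int) = L) (h65 : 65 ≤ c.toNat) (h90 : c.toNat ≤ 90) :
    (S.any fun s => (pvHd s).toNat % 26 == c.toNat % 26) = S.any (pvInGroup L) := by
  rw [Bool.eq_iff_iff, List.any_eq_true, List.any_eq_true]
  constructor <;> rintro ⟨s, hs, hp⟩ <;> refine ⟨s, hs, ?_⟩ <;> have hh := hP s hs <;>
    have hd : pvHeadCode s = ((pvHd s).toNat : Int) := pvHd_code s (by omega) <;>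
    simp only [pvInGroup, beq_iff_eq, Bool.or_eq_true] at hp ⊢ <;> omega

theorem pvCntId (S : List String) (hP : ∀ s ∈ S, 39 ≤ (pvHd s).toNat ∧ (pvHd s).toNat ≤ 90) :
    ("MARCH".toList.countP fun c => S.any (fun s => (pvHd s).toNat % 26 == c.toNat % 26))
      = List.countP id [S.any (pvInGroup 77), S.any (pvInGroup 65), S.any (pvInGroup 82),
          S.any (pvInGroup 67), S.any (pvInGroup 72)] := by
  simp only [show "MARCH".toList = ['M', 'A', 'R', 'C', 'H'] from rfl,
    List.countP_cons, List.countP_nil, id_eq,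
    pvAny_eq S hP 'M' 77 rfl (by decide) (by decide),
    pvAny_eq S hP 'A' 65 rfl (by decide) (by decide),
    pvAny_eq S hP 'R' 82 rfl (by decide) (by decide),
    pvAny_eq S hP 'C' 67 rfl (by decide) (by decide),
    pvAny_eq S hP 'H' 72 rfl (by decide) (by decide)]
  rfl

theorem pvE3_eq_of_lt3 (b1 b2 b3 b4 b5 : Bool) (m a r c h m' a' r' c' h' : Int)
    (H1 : b1 = false → m = 0 ∧ m' = 0) (H2 : b2 = false → a = 0 ∧ a' = 0)
    (H3 : b3 = false → r = 0 ∧ r' = 0) (H4 : b4 = false → c = 0 ∧ c' = 0)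
    (H5 : b5 = false → h = 0 ∧ h' = 0)
    (hc : ¬ 3 ≤ List.countP id [b1, b2, b3, b4, b5]) :
    pvE3 m a r c h = pvE3 m' a' r' c' h' := by
  cases b1 <;> cases b2 <;> cases b3 <;> cases b4 <;> cases b5 <;>
    simp_all [pvE3]


-- ---- machinery for the tightness theorem: inside D_solve, A is strictly larger than B ----
theorem pvPairs : ∀ b1 b2 b3 b4 b5 : Bool, 3 ≤ List.countP id [b1, b2, b3, b4, b5] →
    ((b2 = true ∧ b3 = true) ∨ (b2 = true ∧ b4 = true) ∨ (b2 = true ∧ b5 = true) ∨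
     (b3 = true ∧ b4 = true) ∨ (b3 = true ∧ b5 = true) ∨ (b4 = true ∧ b5 = true)) := by decide

theorem pvCntSwap2 : ∀ b1 b2 b3 b4 b5 : Bool,
    List.countP id [b2, b1, b3, b4, b5] = List.countP id [b1, b2, b3, b4, b5] := by decide
theorem pvCntSwap3 : ∀ b1 b2 b3 b4 b5 : Bool,
    List.countP id [b3, b2, b1, b4, b5] = List.countP id [b1, b2, b3, b4, b5] := by decide
theorem pvCntSwap4 : ∀ b1 b2 b3 b4 b5 : Bool,
    List.countP id [b4, b2, b3, b1, b5] = List.countP id [b1, b2, b3, b4, b5] := by decide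
theorem pvCntSwap5 : ∀ b1 b2 b3 b4 b5 : Bool,
    List.countP id [b5, b2, b3, b4, b1] = List.countP id [b1, b2, b3, b4, b5] := by decide

theorem pvE3_swap2 (x1 x2 x3 x4 x5 : Int) : pvE3 x1 x2 x3 x4 x5 = pvE3 x2 x1 x3 x4 x5 := by
  unfold pvE3; ring
theorem pvE3_swap3 (x1 x2 x3 x4 x5 : Int) : pvE3 x1 x2 x3 x4 x5 = pvE3 x3 x2 x1 x4 x5 := by
  unfold pvE3; ring
theorem pvE3_swap4 (x1 x2 x3 x4 x5 : Int) : pvE3 x1 x2 x3 x4 x5 = pvE3 x4 x2 x3 x1 x5 := by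
  unfold pvE3; ring
theorem pvE3_swap5 (x1 x2 x3 x4 x5 : Int) : pvE3 x1 x2 x3 x4 x5 = pvE3 x5 x2 x3 x4 x1 := by
  unfold pvE3; ring

theorem pvCountP_lt {p q : String → Bool} : ∀ (l : List String),
    (∀ x ∈ l, p x = true → q x = true) → ∀ x, x ∈ l → q x = true → p x = false →
    l.countP p < l.countP q := by
  intro l
  induction l with
  | nil => intro _ x hx; cases hx
  | cons a t ih =>
    intro mono x hx hqx hpx
    rw [List.countP_cons, List.countP_cons]
    rcases List.mem_cons.mp hx with rfl | hxt
    · have hle := List.countP_mono_left (fun y hy => mono y (List.mem_cons_of_mem _ hy))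
      simp [hqx, hpx]
      omega
    · have hlt := ih (fun y hy h => mono y (List.mem_cons_of_mem _ hy) h) x hxt hqx hpx
      have hq : (if p a = true then 1 else 0) ≤ (if q a = true then 1 else 0) := by
        split_ifs with h1 h2
        · omega
        · exact absurd (mono a List.mem_cons_self h1) h2
        · omega
        · omega
      omega

theorem pvACnt_nonneg (S : List String) (L : Int) : 0 ≤ pvACnt S L := Int.natCast_nonneg _

theorem pvBCnt_nonneg (S : List String) (ch : Char) : 0 ≤ pvCountFirst S ch := by
  rw [pvBCnt_countP]; exact Int.natCast_nonneg _

theorem pvACnt_pos (S : List String) (L : Int) (h : S.any (pvInGroup L) = true) :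
    1 ≤ pvACnt S L := by
  have := (List.countP_pos_iff (l := S) (p := fun s => pvInGroup L s)).mpr
    (by simpa using List.any_eq_true.mp h)
  unfold pvACnt
  omega

theorem pvBCnt_le (S : List String) (hP : ∀ s ∈ S, 39 ≤ pvHeadCode s ∧ pvHeadCode s ≤ 90)
    (ch : Char) (L : Int) (hch : (ch.toNat : Int) = L) : pvCountFirst S ch ≤ pvACnt S L := by
  rw [pvBCnt_countP]
  unfold pvACnt
  have := List.countP_mono_left (l := S)
    (p := fun s => s.toList.take 1 == [ch]) (q := fun s => pvInGroup L s)
    (by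
      intro s hs hp
      have hne := (hP s hs).1
      simp only [beq_iff_eq] at hp
      have := (pvTake1_iff s ch hne).mp hp
      simp only [pvInGroup, Bool.or_eq_true, beq_iff_eq]
      omega)
  omega

theorem pvStrict (S : List String) (hP : ∀ s ∈ S, 39 ≤ pvHeadCode s ∧ pvHeadCode s ≤ 90)
    (ch : Char) (L : Int) (hch : (ch.toNat : Int) = L) (s0 : String) (hs0 : s0 ∈ S)
    (he0 : pvHeadCode s0 = L - 26) : pvCountFirst S ch < pvACnt S L := by
  rw [pvBCnt_countP]
  unfold pvACnt
  have := pvCountP_lt (p := fun s => s.toList.take 1 == [ch]) (q := fun s => pvInGroup L s) S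
    (by
      intro s hs hp
      have hne := (hP s hs).1
      simp only [beq_iff_eq] at hp
      have := (pvTake1_iff s ch hne).mp hp
      simp only [pvInGroup, Bool.or_eq_true, beq_iff_eq]
      omega)
    s0 hs0
    (by simp only [pvInGroup, Bool.or_eq_true, beq_iff_eq]; omega)
    (by
      have hne := (hP s0 hs0).1
      rw [beq_eq_false_iff_ne, ne_eq]
      intro hp
      have := (pvTake1_iff s0 ch hne).mp hp
      omega)
  omega

theorem pvE3_lt1 (m a r c h m' a' r' c' h' : Int)
    (h0m : 0 ≤ m) (h0a : 0 ≤ a) (h0r : 0 ≤ r) (h0c : 0 ≤ c) (h0h : 0 ≤ h)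
    (hm : m < m') (ha : a ≤ a') (hr : r ≤ r') (hc : c ≤ c') (hh : h ≤ h')
    (he2 : 1 ≤ a'*r' + a'*c' + a'*h' + r'*c' + r'*h' + c'*h') :
    pvE3 m a r c h < pvE3 m' a' r' c' h' := by
  have par : a*r ≤ a'*r' := mul_le_mul ha hr h0r (h0a.trans ha)
  have pac : a*c ≤ a'*c' := mul_le_mul ha hc h0c (h0a.trans ha)
  have pah : a*h ≤ a'*h' := mul_le_mul ha hh h0h (h0a.trans ha)
  have prc : r*c ≤ r'*c' := mul_le_mul hr hc h0c (h0r.trans hr)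
  have prh : r*h ≤ r'*h' := mul_le_mul hr hh h0h (h0r.trans hr)
  have pch : c*h ≤ c'*h' := mul_le_mul hc hh h0h (h0c.trans hc)
  have hE2 : a*r + a*c + a*h + r*c + r*h + c*h
      ≤ a'*r' + a'*c' + a'*h' + r'*c' + r'*h' + c'*h' := by linarith
  have h1 : m * (a*r + a*c + a*h + r*c + r*h + c*h)
      ≤ m * (a'*r' + a'*c' + a'*h' + r'*c' + r'*h' + c'*h') := mul_le_mul_of_nonneg_left hE2 h0m
  have h3 : 1 ≤ (m' - m) * (a'*r' + a'*c' + a'*h' + r'*c' + r'*h' + c'*h') := by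
    nlinarith [mul_le_mul (show (1:Int) ≤ m' - m by omega) he2 zero_le_one (by omega)]
  have tarc : a*r*c ≤ a'*r'*c' := mul_le_mul par hc h0c (mul_nonneg (h0a.trans ha) (h0r.trans hr))
  have tarh : a*r*h ≤ a'*r'*h' := mul_le_mul par hh h0h (mul_nonneg (h0a.trans ha) (h0r.trans hr))
  have tach : a*c*h ≤ a'*c'*h' := mul_le_mul pac hh h0h (mul_nonneg (h0a.trans ha) (h0c.trans hc))
  have trch : r*c*h ≤ r'*c'*h' := mul_le_mul prc hh h0h (mul_nonneg (h0r.trans hr) (h0c.trans hc))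
  unfold pvE3
  nlinarith [h1, h3, tarc, tarh, tach, trch]

-- ===== VERDICT (by name: the statement is the Claim_ definition above) =====
theorem solve_spec : Claim_unchanged_solve := by
  intro N S _ hP hD
  have hP' : ∀ s ∈ S, 39 ≤ pvHeadCode s ∧ pvHeadCode s ≤ 90 := by
    intro s hs
    have h := hP s hs
    have hd := pvHd_code s h.1
    omega
  rw [pvSolveA_eq N S hP', pvSolveB_eq]
  by_cases hal : (S.any fun s => "').38".toList.contains (pvHd s)) = true
  · have hcnt : ¬ 3 ≤ "MARCH".toList.countP
        (fun c => S.any (fun s => (pvHd s).toNat % 26 == c.toNat % 26)) := by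
      intro hcon
      exact hD ⟨hal, hcon⟩
    apply pvE3_eq_of_lt3 (S.any (pvInGroup 77)) (S.any (pvInGroup 65)) (S.any (pvInGroup 82))
      (S.any (pvInGroup 67)) (S.any (pvInGroup 72))
    · intro hb; exact ⟨pvACnt_zero S 77 hb, pvBCnt_zero S 77 'M' rfl hP' hb⟩
    · intro hb; exact ⟨pvACnt_zero S 65 hb, pvBCnt_zero S 65 'A' rfl hP' hb⟩
    · intro hb; exact ⟨pvACnt_zero S 82 hb, pvBCnt_zero S 82 'R' rfl hP' hb⟩
    · intro hb; exact ⟨pvACnt_zero S 67 hb, pvBCnt_zero S 67 'C' rfl hP' hb⟩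
    · intro hb; exact ⟨pvACnt_zero S 72 hb, pvBCnt_zero S 72 'H' rfl hP' hb⟩
    · intro hge
      apply hcnt
      rw [pvCntId S hP]
      exact hge
  · have hal' : ∀ s ∈ S, pvHd s ∉ "').38".toList := by
      intro s hs hmem
      exact hal (List.any_eq_true.mpr ⟨s, hs, by simpa using hmem⟩)
    have hno : ∀ L : Int, L - 26 ∈ ([39, 41, 46, 51, 56] : List Int) →
        ∀ s ∈ S, pvHeadCode s ≠ L - 26 := by
      intro L hL s hs heq
      have h := hP s hs
      have hd := pvHd_code s h.1
      apply hal' s hs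
      have hiff : ∀ ch : Char, pvHd s = ch ↔ (pvHd s).toNat = ch.toNat :=
        fun ch => eq_iff_eq_of_cmp_eq_cmp rfl
      simp only [show "').38".toList = ['\'', ')', '.', '3', '8'] from rfl,
        List.mem_cons, List.not_mem_nil, or_false, hiff,
        show '\''.toNat = 39 from rfl, show ')'.toNat = 41 from rfl,
        show '.'.toNat = 46 from rfl, show '3'.toNat = 51 from rfl,
        show '8'.toNat = 56 from rfl] at hL ⊢
      omega
    rw [pvCnt_agree S 77 'M' rfl hP' (hno 77 (by decide)),
        pvCnt_agree S 65 'A' rfl hP' (hno 65 (by decide)),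
        pvCnt_agree S 82 'R' rfl hP' (hno 82 (by decide)),
        pvCnt_agree S 67 'C' rfl hP' (hno 67 (by decide)),
        pvCnt_agree S 72 'H' rfl hP' (hno 72 (by decide))]
theorem solve_changed : Claim_changed_solve := by unfold Claim_changed_solve; decide

set_option maxHeartbeats 1600000 in
theorem solve_tight : Claim_exact_solve := by
  intro N S _ hP hD
  obtain ⟨hal, h3⟩ := hD
  have hP' : ∀ s ∈ S, 39 ≤ pvHeadCode s ∧ pvHeadCode s ≤ 90 := by
    intro s hs
    have h := hP s hs
    have hd := pvHd_code s h.1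
    omega
  have h3' : 3 ≤ List.countP id [S.any (pvInGroup 77), S.any (pvInGroup 65), S.any (pvInGroup 82),
      S.any (pvInGroup 67), S.any (pvInGroup 72)] := by
    rw [← pvCntId S hP]
    exact h3
  obtain ⟨s0, hs0, hc0⟩ := List.any_eq_true.mp hal
  have hmem : pvHd s0 ∈ ['\'', ')', '.', '3', '8'] := by simpa using hc0
  rw [pvSolveA_eq N S hP', pvSolveB_eq]
  apply ne_of_gt
  simp only [List.mem_cons, List.not_mem_nil, or_false] at hmem
  rcases hmem with h0 | h0 | h0 | h0 | h0
  · have he0 : pvHeadCode s0 = 39 := by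
      have t := pvHd_code s0 (by rw [h0]; decide)
      rw [h0] at t
      exact t
    have hst : pvCountFirst S 'A' < pvACnt S 65 := pvStrict S hP' 'A' 65 rfl s0 hs0 (by omega)
    rw [pvE3_swap2 (pvACnt S 77) (pvACnt S 65) (pvACnt S 82) (pvACnt S 67) (pvACnt S 72),
        pvE3_swap2 (pvCountFirst S 'M') (pvCountFirst S 'A') (pvCountFirst S 'R') (pvCountFirst S 'C') (pvCountFirst S 'H')]
    rcases pvPairs _ _ _ _ _ (by rw [pvCntSwap2]; exact h3') with ⟨h1, h2⟩ | ⟨h1, h2⟩ | ⟨h1, h2⟩ | ⟨h1, h2⟩ | ⟨h1, h2⟩ | ⟨h1, h2⟩ <;>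
      exact pvE3_lt1 _ _ _ _ _ _ _ _ _ _
        (pvBCnt_nonneg S 'A') (pvBCnt_nonneg S 'M') (pvBCnt_nonneg S 'R') (pvBCnt_nonneg S 'C') (pvBCnt_nonneg S 'H')
        hst (pvBCnt_le S hP' 'M' 77 rfl) (pvBCnt_le S hP' 'R' 82 rfl) (pvBCnt_le S hP' 'C' 67 rfl) (pvBCnt_le S hP' 'H' 72 rfl)
        (by nlinarith [pvACnt_pos S _ h1, pvACnt_pos S _ h2,
          mul_le_mul (pvACnt_pos S _ h1) (pvACnt_pos S _ h2) zero_le_one (by linarith [pvACnt_pos S _ h1]),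
          mul_nonneg (pvACnt_nonneg S 77) (pvACnt_nonneg S 82), mul_nonneg (pvACnt_nonneg S 77) (pvACnt_nonneg S 67), mul_nonneg (pvACnt_nonneg S 77) (pvACnt_nonneg S 72), mul_nonneg (pvACnt_nonneg S 82) (pvACnt_nonneg S 67), mul_nonneg (pvACnt_nonneg S 82) (pvACnt_nonneg S 72), mul_nonneg (pvACnt_nonneg S 67) (pvACnt_nonneg S 72)])
  · have he0 : pvHeadCode s0 = 41 := by
      have t := pvHd_code s0 (by rw [h0]; decide)
      rw [h0] at t
      exact t
    have hst : pvCountFirst S 'C' < pvACnt S 67 := pvStrict S hP' 'C' 67 rfl s0 hs0 (by omega)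
    rw [pvE3_swap4 (pvACnt S 77) (pvACnt S 65) (pvACnt S 82) (pvACnt S 67) (pvACnt S 72),
        pvE3_swap4 (pvCountFirst S 'M') (pvCountFirst S 'A') (pvCountFirst S 'R') (pvCountFirst S 'C') (pvCountFirst S 'H')]
    rcases pvPairs _ _ _ _ _ (by rw [pvCntSwap4]; exact h3') with ⟨h1, h2⟩ | ⟨h1, h2⟩ | ⟨h1, h2⟩ | ⟨h1, h2⟩ | ⟨h1, h2⟩ | ⟨h1, h2⟩ <;>
      exact pvE3_lt1 _ _ _ _ _ _ _ _ _ _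
        (pvBCnt_nonneg S 'C') (pvBCnt_nonneg S 'A') (pvBCnt_nonneg S 'R') (pvBCnt_nonneg S 'M') (pvBCnt_nonneg S 'H')
        hst (pvBCnt_le S hP' 'A' 65 rfl) (pvBCnt_le S hP' 'R' 82 rfl) (pvBCnt_le S hP' 'M' 77 rfl) (pvBCnt_le S hP' 'H' 72 rfl)
        (by nlinarith [pvACnt_pos S _ h1, pvACnt_pos S _ h2,
          mul_le_mul (pvACnt_pos S _ h1) (pvACnt_pos S _ h2) zero_le_one (by linarith [pvACnt_pos S _ h1]),
          mul_nonneg (pvACnt_nonneg S 65) (pvACnt_nonneg S 82), mul_nonneg (pvACnt_nonneg S 65) (pvACnt_nonneg S 77), mul_nonneg (pvACnt_nonneg S 65) (pvACnt_nonneg S 72), mul_nonneg (pvACnt_nonneg S 82) (pvACnt_nonneg S 77), mul_nonneg (pvACnt_nonneg S 82) (pvACnt_nonneg S 72), mul_nonneg (pvACnt_nonneg S 77) (pvACnt_nonneg S 72)])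
  · have he0 : pvHeadCode s0 = 46 := by
      have t := pvHd_code s0 (by rw [h0]; decide)
      rw [h0] at t
      exact t
    have hst : pvCountFirst S 'H' < pvACnt S 72 := pvStrict S hP' 'H' 72 rfl s0 hs0 (by omega)
    rw [pvE3_swap5 (pvACnt S 77) (pvACnt S 65) (pvACnt S 82) (pvACnt S 67) (pvACnt S 72),
        pvE3_swap5 (pvCountFirst S 'M') (pvCountFirst S 'A') (pvCountFirst S 'R') (pvCountFirst S 'C') (pvCountFirst S 'H')]
    rcases pvPairs _ _ _ _ _ (by rw [pvCntSwap5]; exact h3') with ⟨h1, h2⟩ | ⟨h1, h2⟩ | ⟨h1, h2⟩ | ⟨h1, h2⟩ | ⟨h1, h2⟩ | ⟨h1, h2⟩ <;>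
      exact pvE3_lt1 _ _ _ _ _ _ _ _ _ _
        (pvBCnt_nonneg S 'H') (pvBCnt_nonneg S 'A') (pvBCnt_nonneg S 'R') (pvBCnt_nonneg S 'C') (pvBCnt_nonneg S 'M')
        hst (pvBCnt_le S hP' 'A' 65 rfl) (pvBCnt_le S hP' 'R' 82 rfl) (pvBCnt_le S hP' 'C' 67 rfl) (pvBCnt_le S hP' 'M' 77 rfl)
        (by nlinarith [pvACnt_pos S _ h1, pvACnt_pos S _ h2,
          mul_le_mul (pvACnt_pos S _ h1) (pvACnt_pos S _ h2) zero_le_one (by linarith [pvACnt_pos S _ h1]),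
          mul_nonneg (pvACnt_nonneg S 65) (pvACnt_nonneg S 82), mul_nonneg (pvACnt_nonneg S 65) (pvACnt_nonneg S 67), mul_nonneg (pvACnt_nonneg S 65) (pvACnt_nonneg S 77), mul_nonneg (pvACnt_nonneg S 82) (pvACnt_nonneg S 67), mul_nonneg (pvACnt_nonneg S 82) (pvACnt_nonneg S 77), mul_nonneg (pvACnt_nonneg S 67) (pvACnt_nonneg S 77)])
  · have he0 : pvHeadCode s0 = 51 := by
      have t := pvHd_code s0 (by rw [h0]; decide)
      rw [h0] at t
      exact t
    have hst : pvCountFirst S 'M' < pvACnt S 77 := pvStrict S hP' 'M' 77 rfl s0 hs0 (by omega)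
    rcases pvPairs _ _ _ _ _ h3' with ⟨h1, h2⟩ | ⟨h1, h2⟩ | ⟨h1, h2⟩ | ⟨h1, h2⟩ | ⟨h1, h2⟩ | ⟨h1, h2⟩ <;>
      exact pvE3_lt1 _ _ _ _ _ _ _ _ _ _
        (pvBCnt_nonneg S 'M') (pvBCnt_nonneg S 'A') (pvBCnt_nonneg S 'R') (pvBCnt_nonneg S 'C') (pvBCnt_nonneg S 'H')
        hst (pvBCnt_le S hP' 'A' 65 rfl) (pvBCnt_le S hP' 'R' 82 rfl) (pvBCnt_le S hP' 'C' 67 rfl) (pvBCnt_le S hP' 'H' 72 rfl)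
        (by nlinarith [pvACnt_pos S _ h1, pvACnt_pos S _ h2,
          mul_le_mul (pvACnt_pos S _ h1) (pvACnt_pos S _ h2) zero_le_one (by linarith [pvACnt_pos S _ h1]),
          mul_nonneg (pvACnt_nonneg S 65) (pvACnt_nonneg S 82), mul_nonneg (pvACnt_nonneg S 65) (pvACnt_nonneg S 67), mul_nonneg (pvACnt_nonneg S 65) (pvACnt_nonneg S 72), mul_nonneg (pvACnt_nonneg S 82) (pvACnt_nonneg S 67), mul_nonneg (pvACnt_nonneg S 82) (pvACnt_nonneg S 72), mul_nonneg (pvACnt_nonneg S 67) (pvACnt_nonneg S 72)])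
  · have he0 : pvHeadCode s0 = 56 := by
      have t := pvHd_code s0 (by rw [h0]; decide)
      rw [h0] at t
      exact t
    have hst : pvCountFirst S 'R' < pvACnt S 82 := pvStrict S hP' 'R' 82 rfl s0 hs0 (by omega)
    rw [pvE3_swap3 (pvACnt S 77) (pvACnt S 65) (pvACnt S 82) (pvACnt S 67) (pvACnt S 72),
        pvE3_swap3 (pvCountFirst S 'M') (pvCountFirst S 'A') (pvCountFirst S 'R') (pvCountFirst S 'C') (pvCountFirst S 'H')]
    rcases pvPairs _ _ _ _ _ (by rw [pvCntSwap3]; exact h3') with ⟨h1, h2⟩ | ⟨h1, h2⟩ | ⟨h1, h2⟩ | ⟨h1, h2⟩ | ⟨h1, h2⟩ | ⟨h1, h2⟩ <;>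
      exact pvE3_lt1 _ _ _ _ _ _ _ _ _ _
        (pvBCnt_nonneg S 'R') (pvBCnt_nonneg S 'A') (pvBCnt_nonneg S 'M') (pvBCnt_nonneg S 'C') (pvBCnt_nonneg S 'H')
        hst (pvBCnt_le S hP' 'A' 65 rfl) (pvBCnt_le S hP' 'M' 77 rfl) (pvBCnt_le S hP' 'C' 67 rfl) (pvBCnt_le S hP' 'H' 72 rfl)
        (by nlinarith [pvACnt_pos S _ h1, pvACnt_pos S _ h2,
          mul_le_mul (pvACnt_pos S _ h1) (pvACnt_pos S _ h2) zero_le_one (by linarith [pvACnt_pos S _ h1]),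
          mul_nonneg (pvACnt_nonneg S 65) (pvACnt_nonneg S 77), mul_nonneg (pvACnt_nonneg S 65) (pvACnt_nonneg S 67), mul_nonneg (pvACnt_nonneg S 65) (pvACnt_nonneg S 72), mul_nonneg (pvACnt_nonneg S 77) (pvACnt_nonneg S 67), mul_nonneg (pvACnt_nonneg S 77) (pvACnt_nonneg S 72), mul_nonneg (pvACnt_nonneg S 67) (pvACnt_nonneg S 72)])
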